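-- pv_equiv track=rewrite | github.com/MitraLab-Organization/bap-ontology-editor | scripts/generate_tree.py | generate_relationship_tables
-- ===== SOURCE A (Python) =====
-- from typing import Dict, List, Optional
-- from collections import defaultdict
--
-- def get_structure_name(structures: Dict[str, dict], id_or_name: str) -> str:
--     """Get structure name from ID or return as-is if already a name."""
--     if id_or_name in structures:
--         return structures[id_or_name].get('name', id_or_name)
--     return id_or_name
--
-- def generate_relationship_tables(structures: Dict[str, dict], relationships: Dict[str, List[dict]]) -> str:
--     """Generate markdown tables for all relationships."""
--     sections = []
--
--     # Innervation table (grouped by nerve)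
--     innervation = relationships.get('innervated_by', [])
--     if innervation:
--         by_nerve = defaultdict(list)
--         for rel in innervation:
--             nerve = get_structure_name(structures, rel.get('object', ''))
--             muscle = get_structure_name(structures, rel.get('subject', ''))
--             by_nerve[nerve].append(muscle)
--
--         lines = ["### Innervation", "", "| Nerve | Innervates |", "|-------|------------|"]
--         for nerve, muscles in sorted(by_nerve.items()):
--             muscle_list = ", ".join(sorted(muscles))
--             lines.append(f"| {nerve} | {muscle_list} |")
--         sections.append('\n'.join(lines))
--
--     # Blood supply table
--     blood_supply = relationships.get('supplied_by', [])
--     if blood_supply: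
--         by_artery = defaultdict(list)
--         for rel in blood_supply:
--             artery = get_structure_name(structures, rel.get('object', ''))
--             structure = get_structure_name(structures, rel.get('subject', ''))
--             by_artery[artery].append(structure)
--
--         lines = ["### Blood Supply", "", "| Artery | Supplies |", "|--------|----------|"]
--         for artery, supplied in sorted(by_artery.items()):
--             struct_list = ", ".join(sorted(supplied))
--             lines.append(f"| {artery} | {struct_list} |")
--         sections.append('\n'.join(lines))
--
--     # Developmental origins
--     developmental = relationships.get('develops_from', [])
--     if developmental:
--         lines = ["### Developmental Origins", "", "| Structure | Develops From |", "|-----------|---------------|"]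
--         for rel in developmental:
--             structure = get_structure_name(structures, rel.get('subject', ''))
--             origin = get_structure_name(structures, rel.get('object', ''))
--             lines.append(f"| {structure} | {origin} |")
--         sections.append('\n'.join(lines))
--
--     return '\n\n'.join(sections)
-- ===== SOURCE B (Python) =====
-- def get_structure_name(structures, id_or_name):
--     """Get structure name from ID or return as-is if already a name."""
--     if id_or_name in structures:
--         return structures[id_or_name].get('name', id_or_name)
--     return id_or_name
--
--
-- def _grouped_section(structures, rels, header):
--     """Sort the (object-name, subject-name) pairs once, then group them in a
--     single ordered pass: keys and per-key value lists come out already sorted."""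
--     pairs = sorted([(get_structure_name(structures, rel.get('object', '')),
--                      get_structure_name(structures, rel.get('subject', '')))
--                     for rel in rels])
--     groups = {}
--     for obj, subj in pairs:
--         groups.setdefault(obj, []).append(subj)
--     lines = header + [f"| {obj} | {', '.join(subjs)} |" for obj, subjs in groups.items()]
--     return '\n'.join(lines)
--
--
-- def generate_relationship_tables(structures, relationships):
--     """Generate markdown tables for all relationships."""
--     sections = []
--
--     innervation = relationships.get('innervated_by', [])
--     if innervation:
--         sections.append(_grouped_section(
--             structures, innervation,
--             ["### Innervation", "", "| Nerve | Innervates |", "|-------|------------|"]))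
--
--     blood_supply = relationships.get('supplied_by', [])
--     if blood_supply:
--         sections.append(_grouped_section(
--             structures, blood_supply,
--             ["### Blood Supply", "", "| Artery | Supplies |", "|--------|----------|"]))
--
--     developmental = relationships.get('develops_from', [])
--     if developmental:
--         rows = [f"| {get_structure_name(structures, rel.get('subject', ''))}"
--                 f" | {get_structure_name(structures, rel.get('object', ''))} |"
--                 for rel in developmental]
--         sections.append('\n'.join(
--             ["### Developmental Origins", "", "| Structure | Develops From |",
--              "|-----------|---------------|"] + rows))
--
--     return '\n\n'.join(sections)
-- ===== Notes on version B (the rewrite author's own statement) =====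
-- stated objective: alternative
-- what changed: A groups each relationship list into a defaultdict and then sorts the keyed items plus every per-group value list; B instead sorts the raw (object-name, subject-name) pairs once and does a single ordered grouping pass, so keys and value lists come out already sorted with no per-group sort, and the two grouped tables share one helper.
import Mathlib
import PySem

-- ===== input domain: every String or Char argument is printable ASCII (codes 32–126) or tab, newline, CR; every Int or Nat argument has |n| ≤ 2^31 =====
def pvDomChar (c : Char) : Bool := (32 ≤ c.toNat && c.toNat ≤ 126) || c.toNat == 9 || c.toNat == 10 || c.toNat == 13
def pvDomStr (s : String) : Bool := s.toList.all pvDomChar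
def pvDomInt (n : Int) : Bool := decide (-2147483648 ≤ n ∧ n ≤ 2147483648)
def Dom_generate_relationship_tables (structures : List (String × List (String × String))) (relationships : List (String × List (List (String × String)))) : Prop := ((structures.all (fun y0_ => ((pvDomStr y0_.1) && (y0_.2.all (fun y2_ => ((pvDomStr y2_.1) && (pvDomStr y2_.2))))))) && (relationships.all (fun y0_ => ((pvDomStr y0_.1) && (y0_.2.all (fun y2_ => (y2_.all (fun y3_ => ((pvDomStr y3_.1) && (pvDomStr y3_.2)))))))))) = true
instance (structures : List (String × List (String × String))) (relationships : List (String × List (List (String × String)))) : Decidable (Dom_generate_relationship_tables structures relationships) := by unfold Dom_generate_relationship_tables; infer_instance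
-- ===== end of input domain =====

-- B sorts each table's (object-name, subject-name) pairs once and groups them in a single
-- ordered pass (keys and value lists come out sorted), instead of A's group-then-sort-each-group.


-- ===== PORT A =====
-- get_structure_name (shared module helper, used verbatim by both implementations)
def pvGetName (structures : List (String × List (String × String))) (id_or_name : String) : String :=
  match (PySem.Dict.mk structures).get? id_or_name with
  | some d => (PySem.Dict.mk d).getD "name" id_or_name
  | none => id_or_name

def generate_relationship_tables (structures : List (String × List (String × String))) (relationships : List (String × List (List (String × String)))) : String :=
  let sections : List String := []
  -- Innervation table (grouped by nerve)
  let innervation := (PySem.Dict.mk relationships).getD "innervated_by" []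
  let sections :=
    if innervation.isEmpty then sections else
      let by_nerve := innervation.foldl (fun d rel =>
          d.modify (pvGetName structures ((PySem.Dict.mk rel).getD "object" "")) []
            (fun ms => ms ++ [pvGetName structures ((PySem.Dict.mk rel).getD "subject" "")]))
        (PySem.Dict.empty : PySem.Dict String (List String))
      -- Python sorts the (key, value-list) tuples; a dict's keys are distinct, so the tuple
      -- comparison is decided by the key alone — sorting by the key is exact here.
      let lines := (PySem.List.sorted by_nerve.items (fun p => p.1)).foldl
        (fun ls p => ls ++ ["| " ++ p.1 ++ " | " ++ PySem.Str.join ", " (PySem.List.sorted p.2 (fun m => m)) ++ " |"])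
        ["### Innervation", "", "| Nerve | Innervates |", "|-------|------------|"]
      sections ++ [PySem.Str.join "\n" lines]
  -- Blood supply table
  let blood_supply := (PySem.Dict.mk relationships).getD "supplied_by" []
  let sections :=
    if blood_supply.isEmpty then sections else
      let by_artery := blood_supply.foldl (fun d rel =>
          d.modify (pvGetName structures ((PySem.Dict.mk rel).getD "object" "")) []
            (fun ss => ss ++ [pvGetName structures ((PySem.Dict.mk rel).getD "subject" "")]))
        (PySem.Dict.empty : PySem.Dict String (List String))
      let lines := (PySem.List.sorted by_artery.items (fun p => p.1)).foldl
        (fun ls p => ls ++ ["| " ++ p.1 ++ " | " ++ PySem.Str.join ", " (PySem.List.sorted p.2 (fun m => m)) ++ " |"])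
        ["### Blood Supply", "", "| Artery | Supplies |", "|--------|----------|"]
      sections ++ [PySem.Str.join "\n" lines]
  -- Developmental origins
  let developmental := (PySem.Dict.mk relationships).getD "develops_from" []
  let sections :=
    if developmental.isEmpty then sections else
      let lines := developmental.foldl (fun ls rel =>
          ls ++ ["| " ++ pvGetName structures ((PySem.Dict.mk rel).getD "subject" "") ++ " | " ++
                 pvGetName structures ((PySem.Dict.mk rel).getD "object" "") ++ " |"])
        ["### Developmental Origins", "", "| Structure | Develops From |", "|-----------|---------------|"]
      sections ++ [PySem.Str.join "\n" lines]
  PySem.Str.join "\n\n" sections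

-- ===== PORT B =====
-- _grouped_section: sort the pairs once (Python tuple sort = sorted2), then one ordered grouping
-- pass; 'groups.setdefault(obj, []).append(subj)' is exactly Dict.modify obj [] (· ++ [subj]).
def pvGroupedSection (structures : List (String × List (String × String))) (rels : List (List (String × String))) (header : List String) : String :=
  let pairs := PySem.List.sorted2
    (rels.map (fun rel => (pvGetName structures ((PySem.Dict.mk rel).getD "object" ""),
                           pvGetName structures ((PySem.Dict.mk rel).getD "subject" ""))))
    (fun p => p.1) (fun p => p.2)
  let groups := pairs.foldl (fun d p => d.modify p.1 [] (fun vs => vs ++ [p.2]))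
    (PySem.Dict.empty : PySem.Dict String (List String))
  let lines := header ++ groups.items.map (fun p => "| " ++ p.1 ++ " | " ++ PySem.Str.join ", " p.2 ++ " |")
  PySem.Str.join "\n" lines

def generate_relationship_tables_alt (structures : List (String × List (String × String))) (relationships : List (String × List (List (String × String)))) : String :=
  let sections : List String := []
  let innervation := (PySem.Dict.mk relationships).getD "innervated_by" []
  let sections :=
    if innervation.isEmpty then sections else
      sections ++ [pvGroupedSection structures innervation
        ["### Innervation", "", "| Nerve | Innervates |", "|-------|------------|"]]
  let blood_supply := (PySem.Dict.mk relationships).getD "supplied_by" []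
  let sections :=
    if blood_supply.isEmpty then sections else
      sections ++ [pvGroupedSection structures blood_supply
        ["### Blood Supply", "", "| Artery | Supplies |", "|--------|----------|"]]
  let developmental := (PySem.Dict.mk relationships).getD "develops_from" []
  let sections :=
    if developmental.isEmpty then sections else
      sections ++ [PySem.Str.join "\n"
        (["### Developmental Origins", "", "| Structure | Develops From |", "|-----------|---------------|"] ++
         developmental.map (fun rel =>
           "| " ++ pvGetName structures ((PySem.Dict.mk rel).getD "subject" "") ++ " | " ++
           pvGetName structures ((PySem.Dict.mk rel).getD "object" "") ++ " |"))]
  PySem.Str.join "\n\n" sections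

-- ===== PRECONDITION & SPEC =====
def Spec_generate_relationship_tables (structures : List (String × List (String × String))) (relationships : List (String × List (List (String × String)))) (out : String) : Prop := out = generate_relationship_tables_alt structures relationships
instance (structures : List (String × List (String × String))) (relationships : List (String × List (List (String × String)))) (out : String) : Decidable (Spec_generate_relationship_tables structures relationships out) := by unfold Spec_generate_relationship_tables; infer_instance

-- ===== CLAIM (what is proved, stated in full; the proofs are below) =====
def Claim_equal_generate_relationship_tables : Prop := ∀ (structures : List (String × List (String × String))) (relationships : List (String × List (List (String × String)))), Dom_generate_relationship_tables structures relationships → Spec_generate_relationship_tables structures relationships (generate_relationship_tables structures relationships)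

-- ===== LEMMAS AND PROOFS =====
theorem pv_sorted2_eq_sorted_lex {α : Type} (xs : List α) (k1 k2 : α → String) :
    PySem.List.sorted2 xs k1 k2 = PySem.List.sorted xs (fun x => toLex (k1 x, k2 x)) := by
  unfold PySem.List.sorted2 PySem.List.sorted
  simp only [Bool.false_eq_true, if_false]
  congr 1
  funext acc x
  congr 1
  funext a b
  by_cases h1 : k1 a < k1 b
  · simp [h1, Prod.Lex.toLex_lt_toLex]
  · by_cases h2 : k1 b < k1 a
    · have hne : k1 a ≠ k1 b := ne_of_gt h2
      simp [h1, h2, hne, Prod.Lex.toLex_lt_toLex]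
    · have he : k1 a = k1 b := le_antisymm (not_lt.mp h2) (not_lt.mp h1)
      simp [he, Prod.Lex.toLex_lt_toLex]
theorem pv_ofList_sublist (xs : List String) : List.Sublist (PySem.Set.ofList xs) xs := by
  induction xs with
  | nil => simp [PySem.Set.ofList_nil]
  | cons x xs ih =>
    rw [PySem.Set.ofList_cons]
    exact List.Sublist.cons₂ x (List.filter_sublist.trans ih)

def pvDictOf (ps : List (String × String)) : PySem.Dict String (List String) :=
  ps.foldl (fun d p => d.modify p.1 [] (fun vs => vs ++ [p.2]))
    (PySem.Dict.empty : PySem.Dict String (List String))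

theorem pv_dictOf_keys (ps : List (String × String)) :
    (pvDictOf ps).keys = PySem.Set.ofList (ps.map (fun p => p.1)) := by
  unfold pvDictOf
  rw [PySem.Dict.keys_foldl_modify_key ps (fun p => p.1) [] (fun _ p vs => vs ++ [p.2])]
  simp [PySem.Dict.keys_empty, PySem.Set.update_nil_left]

theorem pv_dictOf_getD (ps : List (String × String)) (k : String) :
    (pvDictOf ps).getD k [] = (ps.filter (fun p => p.1 == k)).map (fun p => p.2) := by
  unfold pvDictOf
  rw [PySem.Dict.getD_foldl_modify_append]
  simp [PySem.Dict.getD_empty]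

theorem pv_dictOf_items (ps : List (String × String)) :
    (pvDictOf ps).items = (PySem.Set.ofList (ps.map (fun p => p.1))).map
      (fun k => (k, (ps.filter (fun p => p.1 == k)).map (fun p => p.2))) := by
  rw [PySem.Dict.items_eq_map_keys _ (by rw [pv_dictOf_keys]; exact PySem.Set.nodup_ofList _) []]
  rw [pv_dictOf_keys]
  congr 1
  funext k
  rw [pv_dictOf_getD]

theorem pv_core (ps : List (String × String)) :
    (PySem.List.sorted (pvDictOf ps).items (fun p => p.1)).map
        (fun p => (p.1, PySem.List.sorted p.2 (fun m => m))) =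
      (pvDictOf (PySem.List.sorted2 ps (fun p => p.1) (fun p => p.2))).items := by
  set q := PySem.List.sorted2 ps (fun p => p.1) (fun p => p.2) with hqdef
  have hq : q.Perm ps := by
    rw [hqdef, pv_sorted2_eq_sorted_lex]; exact PySem.List.sorted_perm _ _ _
  have hpw : q.Pairwise (fun a b => toLex (a.1, a.2) ≤ toLex (b.1, b.2)) := by
    rw [hqdef, pv_sorted2_eq_sorted_lex]
    exact PySem.List.sorted_pairwise _ _
  have hfst : (q.map (fun p => p.1)).Pairwise (· ≤ ·) := by
    rw [List.pairwise_map]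
    exact hpw.imp (fun h => by
      rcases Prod.Lex.toLex_le_toLex.mp h with h | ⟨h, _⟩
      · exact le_of_lt h
      · exact le_of_eq h)
  have hkeys : PySem.List.sorted (PySem.Set.ofList (ps.map (fun p => p.1))) (fun k => k) =
      PySem.Set.ofList (q.map (fun p => p.1)) := by
    apply PySem.List.sorted_eq_of_perm_of_pairwise_lt
    · rw [List.perm_ext_iff_of_nodup (PySem.Set.nodup_ofList _) (PySem.Set.nodup_ofList _)]
      intro a
      rw [PySem.Set.mem_ofList, PySem.Set.mem_ofList]
      exact ⟨fun h => (hq.map (fun p => p.1)).mem_iff.mp h,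
             fun h => (hq.map (fun p => p.1)).mem_iff.mpr h⟩
    · have hle : (PySem.Set.ofList (q.map (fun p => p.1))).Pairwise (· ≤ ·) :=
        hfst.sublist (pv_ofList_sublist _)
      have hne : (PySem.Set.ofList (q.map (fun p => p.1))).Pairwise (· ≠ ·) :=
        PySem.Set.nodup_ofList _
      exact (hle.and hne).imp (fun h => lt_of_le_of_ne h.1 h.2)
  have hgroup : ∀ k : String,
      (q.filter (fun p => p.1 == k)).map (fun p => p.2) =
        PySem.List.sorted ((ps.filter (fun p => p.1 == k)).map (fun p => p.2)) (fun m => m) := by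
    intro k
    symm
    apply PySem.List.sorted_id_eq_of_perm_of_pairwise
    · exact (hq.filter _).map _
    · rw [List.pairwise_map]
      apply List.Pairwise.imp_of_mem (R := fun a b => toLex (a.1, a.2) ≤ toLex (b.1, b.2))
      · intro a b ha hb h
        have ha1 : a.1 = k := by simpa using (List.mem_filter.mp ha).2
        have hb1 : b.1 = k := by simpa using (List.mem_filter.mp hb).2
        rcases Prod.Lex.toLex_le_toLex.mp h with h | ⟨_, h⟩
        · exact absurd (ha1.trans hb1.symm) (ne_of_lt h)
        · exact h
      · exact hpw.sublist (List.filter_sublist)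
  rw [pv_dictOf_items ps, pv_dictOf_items q]
  rw [PySem.List.sorted_eq_of_perm_of_pairwise_lt _
        ((PySem.List.sorted (PySem.Set.ofList (ps.map (fun p => p.1))) (fun k => k)).map
          (fun k => (k, (ps.filter (fun p => p.1 == k)).map (fun p => p.2)))) _
        ((PySem.List.sorted_perm _ _ _).map _)
        (by rw [List.pairwise_map]
            exact PySem.List.sorted_ofList_pairwise_lt _)]
  rw [hkeys, List.map_map]
  congr 1
  funext k
  simp [hgroup k]

theorem pv_section_eq (structures : List (String × List (String × String)))
    (rels : List (List (String × String))) (header : List String) :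
    PySem.Str.join "\n"
      ((PySem.List.sorted (rels.foldl (fun d rel =>
          d.modify (pvGetName structures ((PySem.Dict.mk rel).getD "object" "")) []
            (fun ms => ms ++ [pvGetName structures ((PySem.Dict.mk rel).getD "subject" "")]))
        (PySem.Dict.empty : PySem.Dict String (List String))).items (fun p => p.1)).foldl
        (fun ls p => ls ++ ["| " ++ p.1 ++ " | " ++ PySem.Str.join ", " (PySem.List.sorted p.2 (fun m => m)) ++ " |"])
        header) =
    pvGroupedSection structures rels header := by
  have hA : rels.foldl (fun d rel =>
          d.modify (pvGetName structures ((PySem.Dict.mk rel).getD "object" "")) []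
            (fun ms => ms ++ [pvGetName structures ((PySem.Dict.mk rel).getD "subject" "")]))
        (PySem.Dict.empty : PySem.Dict String (List String)) =
      pvDictOf (rels.map (fun rel => (pvGetName structures ((PySem.Dict.mk rel).getD "object" ""),
                           pvGetName structures ((PySem.Dict.mk rel).getD "subject" "")))) := by
    unfold pvDictOf; rw [List.foldl_map]
  rw [hA, PySem.List.foldl_append_singleton_eq_map]
  simp only [pvGroupedSection]
  congr 1
  rw [show ∀ l : List (String × String), l.foldl (fun d p => d.modify p.1 [] (fun vs => vs ++ [p.2]))
    (PySem.Dict.empty : PySem.Dict String (List String)) = pvDictOf l from fun _ => rfl]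
  rw [← pv_core, List.map_map]
  rfl

-- ===== VERDICT (by name: the statement is the Claim_ definition above) =====
theorem generate_relationship_tables_spec : Claim_equal_generate_relationship_tables := by
  intro structures relationships _
  unfold Spec_generate_relationship_tables
  simp only [generate_relationship_tables, generate_relationship_tables_alt]
  rw [pv_section_eq, pv_section_eq, PySem.List.foldl_append_singleton_eq_map]
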